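-- pv_equiv track=rewrite | github.com/nicholasedger88/coffeelog | app.py | extract_flavour_tokens
-- ===== SOURCE A (Python) =====
-- def extract_flavour_tokens(raw_values: list[str]) -> list[str]:
--     tokens: dict[str, str] = {}
--     for raw in raw_values:
--         for part in raw.split(","):
--             token = part.strip()
--             if not token:
--                 continue
--             key = token.lower()
--             tokens.setdefault(key, token)
--     return sorted(tokens.values(), key=lambda value: value.lower())
-- ===== SOURCE B (Python) =====
-- def extract_flavour_tokens(raw_values: list[str]) -> list[str]:
--     toks: list[str] = []
--     for raw in raw_values:
--         for part in raw.split(","):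
--             token = part.strip()
--             if token:
--                 toks.append(token)
--     toks.sort(key=str.lower)
--     out: list[str] = []
--     prev = None
--     for token in toks:
--         key = token.lower()
--         if key != prev:
--             out.append(token)
--             prev = key
--     return out
-- ===== Notes on version B (the rewrite author's own statement) =====
-- stated objective: alternative
-- what changed: Instead of a dict of first-seen casings that is sorted at the end, B collects every token, stably sorts the whole list by lowercase key, and deduplicates in one linear pass by comparing each token's lowercase key with the previously emitted one (stability makes the first-in-input casing survive).
import Mathlib
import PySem

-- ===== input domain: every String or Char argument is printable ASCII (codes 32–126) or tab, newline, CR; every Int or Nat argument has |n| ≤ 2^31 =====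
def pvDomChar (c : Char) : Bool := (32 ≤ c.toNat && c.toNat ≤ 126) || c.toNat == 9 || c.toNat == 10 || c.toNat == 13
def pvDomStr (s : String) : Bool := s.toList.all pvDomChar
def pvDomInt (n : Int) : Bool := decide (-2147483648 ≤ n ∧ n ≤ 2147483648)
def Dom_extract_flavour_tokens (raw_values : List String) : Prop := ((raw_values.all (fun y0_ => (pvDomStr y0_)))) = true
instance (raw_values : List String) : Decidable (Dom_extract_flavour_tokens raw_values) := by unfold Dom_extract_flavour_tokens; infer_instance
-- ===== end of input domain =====

-- B replaces A's first-wins dict + final sort by: collect all tokens, stably sort them by lowercase key, then one adjacent-key dedup pass; same return value, no speed claim.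

-- ===== PORT A =====
-- the body of A's inner loop over the parts of one raw value
def pvStepA (tokens : PySem.Dict String String) (part : String) : PySem.Dict String String :=
  let token := PySem.Str.strip part
  if token = "" then tokens
  else tokens.setdefault (PySem.Str.lower token) token

def extract_flavour_tokens (raw_values : List String) : List String :=
  let tokens : PySem.Dict String String :=
    raw_values.foldl (fun tokens raw => ((PySem.Str.split? raw ",").getD []).foldl pvStepA tokens)
      PySem.Dict.empty
  PySem.List.sorted tokens.values (fun value => PySem.Str.lower value) false

-- ===== PORT B =====
-- the body of B's inner loop over the parts of one raw value (collecting tokens)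
def pvStepB (toks : List String) (part : String) : List String :=
  let token := PySem.Str.strip part
  if token = "" then toks else toks ++ [token]

-- the body of B's dedup loop; state = (out, prev)
def pvGStep (st : List String × Option String) (token : String) : List String × Option String :=
  let key := PySem.Str.lower token
  if some key ≠ st.2 then (st.1 ++ [token], some key) else st

def extract_flavour_tokens_alt (raw_values : List String) : List String :=
  let toks : List String :=
    raw_values.foldl (fun toks raw => ((PySem.Str.split? raw ",").getD []).foldl pvStepB toks) []
  let sortedToks := PySem.List.sorted toks (fun t => PySem.Str.lower t) false
  (sortedToks.foldl pvGStep ([], none)).1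

-- ===== PRECONDITION & SPEC =====
def Spec_extract_flavour_tokens (raw_values : List String) (out : List String) : Prop := out = extract_flavour_tokens_alt raw_values
instance (raw_values : List String) (out : List String) : Decidable (Spec_extract_flavour_tokens raw_values out) := by unfold Spec_extract_flavour_tokens; infer_instance

-- ===== CLAIM (what is proved, stated in full; the proofs are below) =====
def Claim_equal_extract_flavour_tokens : Prop := ∀ (raw_values : List String), Dom_extract_flavour_tokens raw_values → Spec_extract_flavour_tokens raw_values (extract_flavour_tokens raw_values)

-- ===== LEMMAS AND PROOFS =====

-- recursive form of B's dedup pass (keep a token iff its lowercase key differs from the previous kept one)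
def pvGrec (prev : Option String) : List String → List String
  | [] => []
  | t :: ts =>
    if some (PySem.Str.lower t) = prev then pvGrec prev ts
    else t :: pvGrec (some (PySem.Str.lower t)) ts

-- B's foldl dedup loop computes pvGrec
theorem pvFoldG (l : List String) : ∀ (out : List String) (prev : Option String),
    (l.foldl pvGStep (out, prev)).1 = out ++ pvGrec prev l := by
  induction l with
  | nil => intro out prev; simp [pvGrec]
  | cons t ts ih =>
    intro out prev
    by_cases h : some (PySem.Str.lower t) = prev
    · simp only [List.foldl_cons, pvGStep, h, ne_eq, not_true_eq_false, reduceIte, pvGrec]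
      exact ih out prev
    · simp only [List.foldl_cons, pvGStep, ne_eq, h, not_false_eq_true, reduceIte, pvGrec]
      rw [ih (out ++ [t]) (some (PySem.Str.lower t))]
      simp

-- inserting an element strictly below every key goes to the front
theorem pvInsertBy_front (t : String) (ys : List String)
    (h : ∀ z ∈ ys, PySem.Str.lower t < PySem.Str.lower z) :
    PySem.List.insertBy (fun a b => decide (PySem.Str.lower a < PySem.Str.lower b)) t ys = t :: ys := by
  cases ys with
  | nil => rfl
  | cons z zs =>
    simp only [PySem.List.insertBy]
    rw [if_pos (by simpa using h z (List.mem_cons_self ..))]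

-- L1: inserting a token whose key already occurs in the key-sorted list does not change the dedup result
theorem pvGrec_insertBy_mem (t : String) : ∀ (s : List String) (prev : Option String),
    s.Pairwise (fun a b => PySem.Str.lower a ≤ PySem.Str.lower b) →
    PySem.Str.lower t ∈ s.map PySem.Str.lower →
    pvGrec prev (PySem.List.insertBy (fun a b => decide (PySem.Str.lower a < PySem.Str.lower b)) t s)
      = pvGrec prev s
  | [], prev, _, hm => by simp at hm
  | y :: ys, prev, hp, hm => by
    have hpc := List.pairwise_cons.mp hp
    by_cases hlt : PySem.Str.lower t < PySem.Str.lower y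
    · exfalso
      rcases List.mem_map.mp hm with ⟨z, hz, hzeq⟩
      rcases List.mem_cons.mp hz with rfl | hz'
      · exact absurd hzeq.symm (ne_of_lt hlt)
      · have hyz : PySem.Str.lower y ≤ PySem.Str.lower z := hpc.1 z hz'
        rw [hzeq] at hyz
        exact absurd hlt (not_lt.mpr hyz)
    · simp only [PySem.List.insertBy]
      rw [if_neg (by simpa using hlt)]
      have hkey : pvGrec (some (PySem.Str.lower y))
          (PySem.List.insertBy (fun a b => decide (PySem.Str.lower a < PySem.Str.lower b)) t ys)
          = pvGrec (some (PySem.Str.lower y)) ys := by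
        by_cases hmem : PySem.Str.lower t ∈ ys.map PySem.Str.lower
        · exact pvGrec_insertBy_mem t ys (some (PySem.Str.lower y)) hpc.2 hmem
        · -- then lower t = lower y and every key in ys is strictly above lower t
          have hty : PySem.Str.lower t = PySem.Str.lower y := by
            rcases List.mem_map.mp hm with ⟨z, hz, hzeq⟩
            rcases List.mem_cons.mp hz with rfl | hz'
            · exact hzeq.symm
            · exact absurd (List.mem_map.mpr ⟨z, hz', hzeq⟩) hmem
          have hfront : ∀ z ∈ ys, PySem.Str.lower t < PySem.Str.lower z := by
            intro z hz
            have h1 : PySem.Str.lower y ≤ PySem.Str.lower z := hpc.1 z hz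
            have h2 : PySem.Str.lower t ≠ PySem.Str.lower z :=
              fun he => hmem (List.mem_map.mpr ⟨z, hz, he.symm⟩)
            rw [← hty] at h1
            exact lt_of_le_of_ne h1 h2
          rw [pvInsertBy_front t ys hfront]
          simp [pvGrec, hty]
      by_cases hpy : some (PySem.Str.lower y) = prev
      · simp only [pvGrec]
        rw [if_pos hpy, if_pos hpy, ← hpy]
        exact hkey
      · simp only [pvGrec]
        rw [if_neg hpy, if_neg hpy, hkey]

-- L2: inserting a token with a fresh key commutes with the dedup pass
theorem pvGrec_insertBy_not_mem (t : String) : ∀ (s : List String) (prev : Option String),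
    s.Pairwise (fun a b => PySem.Str.lower a ≤ PySem.Str.lower b) →
    (∀ y ∈ s, PySem.Str.lower y ≠ PySem.Str.lower t) →
    (∀ k, prev = some k → k < PySem.Str.lower t ∧ ∀ y ∈ s, k ≤ PySem.Str.lower y) →
    pvGrec prev (PySem.List.insertBy (fun a b => decide (PySem.Str.lower a < PySem.Str.lower b)) t s)
      = PySem.List.insertBy (fun a b => decide (PySem.Str.lower a < PySem.Str.lower b)) t (pvGrec prev s)
  | [], prev, _, _, hinv => by
    have hne : some (PySem.Str.lower t) ≠ prev := by
      cases prev with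
      | none => simp
      | some k =>
        intro he
        have hk := Option.some.inj he
        have := (hinv k rfl).1
        rw [hk] at this
        exact absurd this (lt_irrefl _)
    simp only [PySem.List.insertBy, pvGrec]
    rw [if_neg (fun he => hne he)]
  | y :: ys, prev, hp, hfresh, hinv => by
    have hpc := List.pairwise_cons.mp hp
    have hney : PySem.Str.lower y ≠ PySem.Str.lower t := hfresh y (List.mem_cons_self ..)
    by_cases hlt : PySem.Str.lower t < PySem.Str.lower y
    · -- t goes in front of y
      have hyprev : some (PySem.Str.lower y) ≠ prev := by
        intro he
        obtain ⟨hk1, _⟩ := hinv _ he.symm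
        exact absurd (lt_trans hk1 hlt) (lt_irrefl _)
      have htprev : some (PySem.Str.lower t) ≠ prev := by
        intro he
        exact absurd (hinv _ he.symm).1 (lt_irrefl _)
      simp only [PySem.List.insertBy]
      rw [if_pos (by simpa using hlt)]
      simp only [pvGrec]
      rw [if_neg htprev, if_neg (by simpa using hney), if_neg hyprev]
      simp only [PySem.List.insertBy]
      rw [if_pos (by simpa using hlt)]
    · -- t goes after y
      have hylt : PySem.Str.lower y < PySem.Str.lower t :=
        lt_of_le_of_ne (not_lt.mp hlt) hney
      simp only [PySem.List.insertBy]
      rw [if_neg (by simpa using hlt)]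
      by_cases hpy : some (PySem.Str.lower y) = prev
      · simp only [pvGrec]
        rw [if_pos hpy, if_pos hpy]
        refine pvGrec_insertBy_not_mem t ys prev hpc.2
          (fun z hz => hfresh z (List.mem_cons_of_mem _ hz)) ?_
        intro k hk
        rw [hk] at hpy
        have hky : k = PySem.Str.lower y := (Option.some.inj hpy).symm
        exact ⟨hky ▸ hylt, fun z hz => hky ▸ hpc.1 z hz⟩
      · simp only [pvGrec]
        rw [if_neg hpy, if_neg hpy]
        rw [pvGrec_insertBy_not_mem t ys (some (PySem.Str.lower y)) hpc.2
          (fun z hz => hfresh z (List.mem_cons_of_mem _ hz))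
          (fun k hk => ⟨(Option.some.inj hk) ▸ hylt, fun z hz => (Option.some.inj hk) ▸ hpc.1 z hz⟩)]
        simp only [PySem.List.insertBy]
        rw [if_neg (by simpa using hlt)]

-- appending one element then sorting = insertBy into the sorted list
theorem pvSorted_append_singleton (vs : List String) (t : String) :
    PySem.List.sorted (vs ++ [t]) (fun v => PySem.Str.lower v) false =
      PySem.List.insertBy (fun a b => decide (PySem.Str.lower a < PySem.Str.lower b)) t
        (PySem.List.sorted vs (fun v => PySem.Str.lower v) false) := by
  rw [PySem.List.sorted_eq_foldl_insertBy, PySem.List.sorted_eq_foldl_insertBy, List.foldl_append]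
  rfl

-- the invariant tying A's dict to B's token list
def pvInv (d : PySem.Dict String String) (toks : List String) : Prop :=
  (∀ p ∈ d.items, p.1 = PySem.Str.lower p.2) ∧
  (∀ k, d.contains k = true ↔ k ∈ toks.map PySem.Str.lower) ∧
  PySem.List.sorted d.values (fun v => PySem.Str.lower v) false
    = pvGrec none (PySem.List.sorted toks (fun t => PySem.Str.lower t) false)

set_option maxHeartbeats 1000000 in
theorem pvInv_step (d : PySem.Dict String String) (toks : List String)
    (h : pvInv d toks) (part : String) : pvInv (pvStepA d part) (pvStepB toks part) := by
  obtain ⟨h1, h2, h3⟩ := h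
  unfold pvStepA pvStepB
  by_cases ht : PySem.Str.strip part = ""
  · simp only [ht, reduceIte]
    exact ⟨h1, h2, h3⟩
  · simp only [if_neg ht]
    set token := PySem.Str.strip part with htok
    set key := PySem.Str.lower token with hkey
    have hsp : (PySem.List.sorted toks (fun t => PySem.Str.lower t) false).Pairwise
        (fun a b => PySem.Str.lower a ≤ PySem.Str.lower b) :=
      PySem.List.sorted_pairwise toks (fun t => PySem.Str.lower t)
    cases hc : d.contains key with
    | true =>
      rw [PySem.Dict.setdefault_of_contains _ _ hc]
      have hmem : key ∈ toks.map PySem.Str.lower := (h2 key).mp hc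
      refine ⟨h1, ?_, ?_⟩
      · intro k
        rw [h2 k]
        simp only [List.map_append, List.map_cons, List.map_nil, List.mem_append,
          List.mem_cons, List.not_mem_nil, or_false]
        constructor
        · exact Or.inl
        · rintro (hk | rfl)
          · exact hk
          · exact hmem
      · have hmem' : key ∈ (PySem.List.sorted toks (fun t => PySem.Str.lower t) false).map PySem.Str.lower := by
          rw [List.mem_map] at hmem ⊢
          obtain ⟨z, hz, hzeq⟩ := hmem
          exact ⟨z, (PySem.List.mem_sorted ..).mpr hz, hzeq⟩
        rw [pvSorted_append_singleton, h3,
          pvGrec_insertBy_mem token _ none hsp (hkey ▸ hmem')]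
    | false =>
      rw [PySem.Dict.setdefault_of_not_contains _ _ hc]
      refine ⟨?_, ?_, ?_⟩
      · intro p hp
        rcases (PySem.Dict.mem_items_insert d key token p).mp hp with hp | hp
        · rw [hp]
        · exact h1 p hp.1
      · intro k
        rw [PySem.Dict.contains_insert]
        simp only [List.map_append, List.map_cons, List.map_nil, List.mem_append,
          List.mem_cons, List.not_mem_nil, or_false, Bool.or_eq_true, beq_iff_eq]
        rw [h2 k]
        exact or_comm
      · have hvals : (d.insert key token).values = d.values ++ [token] := by
          simp [PySem.Dict.values, PySem.Dict.items_insert_of_not_contains _ _ hc]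
        have hfresh : ∀ y ∈ PySem.List.sorted toks (fun t => PySem.Str.lower t) false,
            PySem.Str.lower y ≠ PySem.Str.lower token := by
          intro y hy he
          rw [PySem.List.mem_sorted] at hy
          have hct : d.contains key = true := (h2 key).mpr (by
            rw [hkey, ← he]; exact List.mem_map_of_mem hy)
          rw [hc] at hct; exact Bool.noConfusion hct
        rw [hvals, pvSorted_append_singleton, pvSorted_append_singleton, h3,
          pvGrec_insertBy_not_mem token _ none hsp hfresh (fun k hk => nomatch hk)]

theorem pvInv_foldl (parts : List String) (d : PySem.Dict String String)
    (toks : List String) (h : pvInv d toks) :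
    pvInv (parts.foldl pvStepA d) (parts.foldl pvStepB toks) := by
  induction parts generalizing d toks with
  | nil => exact h
  | cons p ps ih => exact ih _ _ (pvInv_step _ _ h p)

theorem pvInv_main (raws : List String) (d : PySem.Dict String String)
    (toks : List String) (h : pvInv d toks) :
    pvInv (raws.foldl (fun d raw => ((PySem.Str.split? raw ",").getD []).foldl pvStepA d) d)
      (raws.foldl (fun toks raw => ((PySem.Str.split? raw ",").getD []).foldl pvStepB toks) toks) := by
  induction raws generalizing d toks with
  | nil => exact h
  | cons r rs ih => exact ih _ _ (pvInv_foldl _ _ _ h)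

-- ===== VERDICT (by name: the statement is the Claim_ definition above) =====
theorem extract_flavour_tokens_spec : Claim_equal_extract_flavour_tokens := by
  intro raw_values _
  unfold Spec_extract_flavour_tokens extract_flavour_tokens extract_flavour_tokens_alt
  have h0 : pvInv PySem.Dict.empty [] := by
    refine ⟨?_, ?_, rfl⟩ <;>
      simp [PySem.Dict.empty, PySem.Dict.contains]
  have h := pvInv_main raw_values PySem.Dict.empty [] h0
  rw [pvFoldG]
  exact h.2.2.trans (by simp)
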